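-- pv_equiv track=rewrite | github.com/AtoBrightSide/contests | pastContests/D_Divisibility_by_2_n.py | solution
-- ===== SOURCE A (Python) =====
-- def solution(nums, n):
--     def counter(num):
--         if num % 2:
--             return 0
--         return 1 + counter(num // 2)
--
--     count = 0
--     can_use = []
--     for i, num in enumerate(nums):
--         if (i + 1) % 2 == 0:
--             can_use.append(counter(i + 1))
--         count += counter(num)
--
--     if count >= n:
--         return 0
--
--     used = 1
--     can_use.sort()
--     while can_use:
--         count += can_use.pop()
--         if count >= n:
--             return used
--         used += 1
--
--     return -1
-- ===== SOURCE B (Python) =====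
-- def solution(nums, n):
--     def ctz(num):
--         c = 0
--         while num % 2 == 0 and num != 0:
--             num //= 2
--             c += 1
--         return c
--
--     count = 0
--     for num in nums:
--         count += ctz(num)
--     if count >= n:
--         return 0
--
--     m = len(nums)
--     buckets = {}
--     for j in range(2, m + 1, 2):
--         v = ctz(j)
--         buckets[v] = buckets.get(v, 0) + 1
--
--     used = 0
--     for v in sorted(buckets, reverse=True):
--         cnt = buckets[v]
--         need = n - count
--         take = -(-need // v)
--         if take > cnt:
--             take = cnt
--         used += take
--         count += take * v
--         if count >= n:
--             return used
--     return -1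
-- ===== Notes on version B (the rewrite author's own statement) =====
-- stated objective: alternative
-- what changed: B replaces A's recursive counter and sort-then-pop-one-item-at-a-time greedy by an iterative trailing-zeros counter plus a counting-bucket greedy: it tallies how many even indices have each 2-adic valuation in a dict and consumes whole buckets from the largest valuation down, computing the number of items needed per bucket with one ceiling division.
import Mathlib
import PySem

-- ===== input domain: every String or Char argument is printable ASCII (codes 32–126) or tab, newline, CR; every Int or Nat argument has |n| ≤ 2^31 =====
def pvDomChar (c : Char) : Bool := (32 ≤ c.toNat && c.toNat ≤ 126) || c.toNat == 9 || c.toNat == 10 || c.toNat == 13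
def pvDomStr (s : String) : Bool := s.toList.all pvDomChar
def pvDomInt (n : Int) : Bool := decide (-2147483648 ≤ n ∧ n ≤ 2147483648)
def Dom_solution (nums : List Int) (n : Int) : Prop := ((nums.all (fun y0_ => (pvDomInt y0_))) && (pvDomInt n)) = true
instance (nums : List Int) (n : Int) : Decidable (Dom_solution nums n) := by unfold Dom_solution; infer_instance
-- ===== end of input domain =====

-- B replaces A's sort-then-pop-one-by-one greedy with a counting-bucket greedy: it tallies the
-- 2-adic valuations of the even positions in a dict and consumes whole buckets from the largest
-- value down, computing with a ceiling division how many items of each bucket are needed (objective: alternative).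

-- ===== PORT A =====
-- counter(num): Python recurses forever (RecursionError) on num = 0; the port runs on fuel
-- num.natAbs + 1 (always sufficient when the recursion terminates, i.e. num ≠ 0) and the
-- fuel-0 result 0 is a totality guard only — Pre_solution excludes the inputs that reach it.
def counterFuel : Nat → Int → Int
  | 0, _ => 0
  | fuel + 1, num =>
    if PySem.Int.mod num 2 ≠ 0 then 0
    else if num = 0 then 0
    else 1 + counterFuel fuel (PySem.Int.floordiv num 2)

def counterA (num : Int) : Int := counterFuel (num.natAbs + 1) num

-- while can_use: count += can_use.pop(); …  (pop from the END of the list)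
def whileFuel (n : Int) : Nat → Int → Int → List Int → Int
  | 0, _, _, _ => -1
  | fuel + 1, count, used, l =>
    match l with
    | [] => -1
    | x :: xs =>
      let v := (x :: xs).getLast (List.cons_ne_nil x xs)
      if count + v ≥ n then used
      else whileFuel n fuel (count + v) (used + 1) (x :: xs).dropLast

def whileA (n : Int) (count used : Int) (l : List Int) : Int := whileFuel n l.length count used l

def solution (nums : List Int) (n : Int) : Int :=
  let st := (PySem.List.enumerate nums).foldl
    (fun (st : Int × List Int) (p : Int × Int) =>
      (st.1 + counterA p.2,
       if PySem.Int.mod (p.1 + 1) 2 = 0 then st.2 ++ [counterA (p.1 + 1)] else st.2))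
    (0, [])
  if st.1 ≥ n then 0
  else whileA n st.1 1 (PySem.List.sorted st.2 (fun x => x) false)

-- ===== PORT B =====
-- ctz(num): iterative trailing-zeros counter (returns 0 on num = 0, where A's recursive one diverges)
def ctzFuel : Nat → Int → Int → Int
  | 0, _, c => c
  | fuel + 1, num, c =>
    if PySem.Int.mod num 2 = 0 ∧ num ≠ 0 then ctzFuel fuel (PySem.Int.floordiv num 2) (c + 1) else c

def ctzB (num : Int) : Int := ctzFuel (num.natAbs + 1) num 0

-- for v in sorted(buckets, reverse=True): take a whole batch of the bucket at once
def bloop (n : Int) (buckets : PySem.Dict Int Int) : Int → Int → List Int → Int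
  | _, _, [] => -1
  | count, used, v :: rest =>
    let cnt := buckets.getD v 0
    let need := n - count
    let take0 := -(PySem.Int.floordiv (-need) v)
    let tk := if take0 > cnt then cnt else take0
    if count + tk * v ≥ n then used + tk
    else bloop n buckets (count + tk * v) (used + tk) rest

def solution_alt (nums : List Int) (n : Int) : Int :=
  let count := nums.foldl (fun c x => c + ctzB x) 0
  if count ≥ n then 0
  else
    let m : Int := (nums.length : Int)
    let buckets := (PySem.List.pyRange 2 (m + 1) 2).foldl
      (fun d j => d.insert (ctzB j) (d.getD (ctzB j) 0 + 1)) PySem.Dict.empty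
    bloop n buckets count 0 (PySem.List.sorted buckets.keys (fun x => x) true)

-- ===== PRECONDITION & SPEC =====
-- Pre_ excludes inputs containing 0, on which A's recursive counter raises RecursionError.
def Pre_solution (nums : List Int) (n : Int) : Prop := (0 : Int) ∉ nums
instance (nums : List Int) (n : Int) : Decidable (Pre_solution nums n) := by unfold Pre_solution; infer_instance
def pvWitness_solution : List Int × Int := ([2, 3, 12], 4)

def Spec_solution (nums : List Int) (n : Int) (out : Int) : Prop := out = solution_alt nums n
instance (nums : List Int) (n : Int) (out : Int) : Decidable (Spec_solution nums n out) := by unfold Spec_solution; infer_instance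

-- ===== CLAIM (what is proved, stated in full; the proofs are below) =====
def Claim_equal_solution : Prop := ∀ (nums : List Int) (n : Int), Dom_solution nums n → Pre_solution nums n → Spec_solution nums n (solution nums n)

-- ===== LEMMAS AND PROOFS =====

-- the one-at-a-time greedy both loops reduce to (A via list reversal, B via bucket batches)
def gloop (n : Int) (count used : Int) : List Int → Int
  | [] => -1
  | v :: rest => if count + v ≥ n then used else gloop n (count + v) (used + 1) rest

-- the can_use list A's enumerate loop accumulates
def G (s : Int) : Nat → List Int
  | 0 => []
  | len + 1 => (if PySem.Int.mod (s + 1) 2 = 0 then [counterA (s + 1)] else []) ++ G (s + 1) len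

lemma halve_natAbs_lt (num : Int) (h1 : PySem.Int.mod num 2 = 0) (h2 : num ≠ 0) :
    (PySem.Int.floordiv num 2).natAbs < num.natAbs := by
  have hdvd : (2 : Int) ∣ num := (PySem.Int.mod_eq_zero_iff_dvd num 2).mp h1
  obtain ⟨k, hk⟩ := hdvd
  have hf : PySem.Int.floordiv num 2 = k := by
    rw [hk, PySem.Int.floordiv_eq_ediv_of_pos (by norm_num)]
    exact Int.mul_ediv_cancel_left k (by norm_num)
  rw [hf]
  subst hk
  rcases Int.natAbs_eq k with h | h <;> omega

lemma counterFuel_irrel : ∀ (f1 f2 : Nat) (num : Int), num.natAbs < f1 → num.natAbs < f2 →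
    counterFuel f1 num = counterFuel f2 num := by
  intro f1
  induction f1 with
  | zero => intro f2 num h1 h2; omega
  | succ f1 ih =>
    intro f2 num h1 h2
    cases f2 with
    | zero => omega
    | succ f2 =>
      simp only [counterFuel]
      by_cases hm : PySem.Int.mod num 2 ≠ 0
      · rw [if_pos hm, if_pos hm]
      · rw [if_neg hm, if_neg hm]
        by_cases h0 : num = 0
        · rw [if_pos h0, if_pos h0]
        · rw [if_neg h0, if_neg h0]
          have hlt := halve_natAbs_lt num (not_not.mp hm) h0
          rw [ih f2 _ (by omega) (by omega)]

lemma counterA_unfold (num : Int) : counterA num =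
    if PySem.Int.mod num 2 ≠ 0 then 0
    else if num = 0 then 0
    else 1 + counterA (PySem.Int.floordiv num 2) := by
  show counterFuel (num.natAbs + 1) num = _
  simp only [counterFuel]
  by_cases hm : PySem.Int.mod num 2 ≠ 0
  · rw [if_pos hm, if_pos hm]
  · rw [if_neg hm, if_neg hm]
    by_cases h0 : num = 0
    · rw [if_pos h0, if_pos h0]
    · rw [if_neg h0, if_neg h0]
      have hlt := halve_natAbs_lt num (not_not.mp hm) h0
      unfold counterA
      rw [counterFuel_irrel num.natAbs ((PySem.Int.floordiv num 2).natAbs + 1)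
        (PySem.Int.floordiv num 2) hlt (by omega)]

lemma counterFuel_nonneg : ∀ (f : Nat) (num : Int), 0 ≤ counterFuel f num := by
  intro f
  induction f with
  | zero => intro num; simp [counterFuel]
  | succ f ih =>
    intro num
    simp only [counterFuel]
    split_ifs with h1 h2
    · omega
    · omega
    · have := ih (PySem.Int.floordiv num 2); omega

lemma counterA_nonneg (num : Int) : 0 ≤ counterA num := counterFuel_nonneg _ num

lemma counterA_pos (num : Int) (h1 : PySem.Int.mod num 2 = 0) (h2 : num ≠ 0) : 1 ≤ counterA num := by
  rw [counterA_unfold, if_neg (by simpa using h1), if_neg h2]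
  have := counterA_nonneg (PySem.Int.floordiv num 2)
  omega

lemma ctzFuel_eq_counterFuel : ∀ (f : Nat) (num c : Int), ctzFuel f num c = c + counterFuel f num := by
  intro f
  induction f with
  | zero => intro num c; simp [ctzFuel, counterFuel]
  | succ f ih =>
    intro num c
    simp only [ctzFuel, counterFuel]
    by_cases h : PySem.Int.mod num 2 = 0 ∧ num ≠ 0
    · rw [if_pos h, if_neg (not_not.mpr h.1), if_neg h.2, ih]
      ring
    · rw [if_neg h]
      by_cases hm : PySem.Int.mod num 2 ≠ 0
      · rw [if_pos hm]; ring
      · have h0 : num = 0 := by tauto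
        rw [if_neg hm, if_pos h0]; ring

lemma ctzB_eq_counterA : ∀ num, ctzB num = counterA num := by
  intro num
  show ctzFuel (num.natAbs + 1) num 0 = counterA num
  rw [ctzFuel_eq_counterFuel]
  simp [counterA]

lemma whileA_ne_nil (n c u : Int) (l : List Int) (h : l ≠ []) :
    whileA n c u l = (if c + l.getLast h ≥ n then u else whileA n (c + l.getLast h) (u + 1) l.dropLast) := by
  cases l with
  | nil => exact absurd rfl h
  | cons x xs =>
    show whileFuel n (xs.length + 1) c u (x :: xs) = _
    simp only [whileFuel, whileA, List.length_dropLast, List.length_cons, Nat.add_sub_cancel]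

lemma whileA_eq_gloop (n : Int) : ∀ (r : List Int) (c u : Int), whileA n c u r.reverse = gloop n c u r := by
  intro r
  induction r with
  | nil => intro c u; simp [whileA, whileFuel, gloop]
  | cons v rest ih =>
    intro c u
    rw [List.reverse_cons, whileA_ne_nil n c u _ (by simp)]
    rw [List.getLast_append_singleton, List.dropLast_concat, gloop]
    split
    · rfl
    · exact ih _ _

lemma pyRange_two_nil (a b : Int) (h : b ≤ a) : PySem.List.pyRange a b 2 = [] := by
  rw [PySem.List.pyRange_of_pos a b (by norm_num), if_neg (by omega)]
  simp

lemma pyRange_two_cons (a b : Int) (h : a < b) :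
    PySem.List.pyRange a b 2 = a :: PySem.List.pyRange (a + 2) b 2 := by
  rw [PySem.List.pyRange_of_pos a b (by norm_num), PySem.List.pyRange_of_pos (a + 2) b (by norm_num),
    if_pos h]
  have hN : ((b - a + 2 - 1) / 2).toNat
      = (if a + 2 < b then ((b - (a + 2) + 2 - 1) / 2).toNat else 0) + 1 := by
    split <;> omega
  rw [hN, List.range_succ_eq_map, List.map_cons, List.map_map]
  simp only [Nat.cast_zero, mul_zero, add_zero]
  congr 1
  apply List.map_congr_left
  intro k _
  simp only [Function.comp_apply]
  push_cast
  ring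

lemma foldA (xs : List Int) : ∀ (s c : Int) (acc : List Int),
    (PySem.List.enumerate xs s).foldl
      (fun (st : Int × List Int) (p : Int × Int) =>
        (st.1 + counterA p.2,
         if PySem.Int.mod (p.1 + 1) 2 = 0 then st.2 ++ [counterA (p.1 + 1)] else st.2))
      (c, acc)
    = (xs.foldl (fun a x => a + counterA x) c, acc ++ G s xs.length) := by
  induction xs with
  | nil => intro s c acc; simp [PySem.List.enumerate_nil, G]
  | cons x xs ih =>
    intro s c acc
    rw [PySem.List.enumerate_cons]
    simp only [List.foldl_cons]
    rw [ih]
    simp only [G, List.length_cons]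
    split_ifs <;> simp [List.append_assoc]

lemma G_eq : ∀ (len : Nat) (s : Int),
    G s len = (PySem.List.pyRange (if PySem.Int.mod (s + 1) 2 = 0 then s + 1 else s + 2) (s + 1 + len) 2).map counterA := by
  intro len
  induction len with
  | zero =>
    intro s
    simp only [G]
    split_ifs <;> rw [pyRange_two_nil _ _ (by push_cast; omega)] <;> simp
  | succ len ih =>
    intro s
    have hmod : ∀ x : Int, PySem.Int.mod x 2 = x % 2 := fun x => PySem.Int.mod_eq_emod_of_pos (by norm_num)
    simp only [G]
    by_cases h : PySem.Int.mod (s + 1) 2 = 0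
    · have h2 : ¬ PySem.Int.mod (s + 1 + 1) 2 = 0 := by rw [hmod] at h ⊢; omega
      rw [if_pos h, ih (s + 1), if_neg h2, if_pos h]
      push_cast
      rw [show s + 1 + ((len : Int) + 1) = s + 1 + 1 + (len : Int) from by ring]
      rw [pyRange_two_cons (s + 1) (s + 1 + 1 + (len : Int)) (by omega)]
      simp only [List.map_cons, List.singleton_append]
    · have h2 : PySem.Int.mod (s + 1 + 1) 2 = 0 := by rw [hmod] at h ⊢; omega
      rw [if_neg h, ih (s + 1), if_pos h2, if_neg h]
      push_cast
      rw [show s + 1 + ((len : Int) + 1) = s + 1 + 1 + (len : Int) from by ring,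
        show s + 1 + 1 = s + 2 from by ring]
      simp

lemma count_flatMap (cnt : Int → Nat) : ∀ (K : List Int) (a : Int), K.Nodup →
    (K.flatMap (fun v => List.replicate (cnt v) v)).count a = if a ∈ K then cnt a else 0 := by
  intro K
  induction K with
  | nil => intro a _; simp
  | cons v rest ih =>
    intro a hnd
    rw [List.nodup_cons] at hnd
    simp only [List.flatMap_cons, List.count_append, List.count_replicate, ih a hnd.2,
      List.mem_cons]
    by_cases hav : a = v
    · subst hav
      simp [hnd.1]
    · simp [hav, Ne.symm hav, beq_iff_eq]

lemma pairwise_flatMap (cnt : Int → Nat) : ∀ (K : List Int), K.Pairwise (fun a b => b < a) →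
    (K.flatMap (fun v => List.replicate (cnt v) v)).Pairwise (fun a b => b ≤ a) := by
  intro K
  induction K with
  | nil => intro _; simp
  | cons v rest ih =>
    intro hp
    rw [List.pairwise_cons] at hp
    rw [List.flatMap_cons, List.pairwise_append]
    refine ⟨?_, ih hp.2, ?_⟩
    · have : ∀ m : Nat, List.Pairwise (fun a b : Int => b ≤ a) (List.replicate m v) := by
        intro m
        induction m with
        | zero => simp
        | succ m ihm =>
          rw [List.replicate_succ, List.pairwise_cons]
          exact ⟨fun y hy => le_of_eq (List.eq_of_mem_replicate hy), ihm⟩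
      exact this _
    · intro x hx y hy
      have hxv : x = v := List.eq_of_mem_replicate hx
      obtain ⟨u, hu, hyu⟩ := List.mem_flatMap.mp hy
      have hyu' : y = u := List.eq_of_mem_replicate hyu
      subst hxv
      rw [hyu']
      exact le_of_lt (hp.1 u hu)

lemma sorted_rev_eq_flatMap (EV : List Int) :
    (PySem.List.sorted EV (fun x => x) false).reverse
    = (PySem.List.sorted (PySem.Dict.counter EV).keys (fun x => x) true).flatMap
        (fun v => List.replicate (EV.count v) v) := by
  have hkeys : (PySem.Dict.counter EV).keys = PySem.Set.ofList EV := PySem.Dict.keys_counter EV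
  have hndK : (PySem.List.sorted (PySem.Dict.counter EV).keys (fun x => x) true).Nodup := by
    rw [(PySem.List.sorted_perm (PySem.Dict.counter EV).keys (fun x => x) true).nodup_iff, hkeys]
    exact PySem.Set.nodup_ofList EV
  have hmemK : ∀ x : Int, x ∈ PySem.List.sorted (PySem.Dict.counter EV).keys (fun x => x) true ↔ x ∈ EV := by
    intro x
    rw [PySem.List.mem_sorted, hkeys, PySem.Set.mem_ofList]
  have hpairK : (PySem.List.sorted (PySem.Dict.counter EV).keys (fun x => x) true).Pairwise
      (fun a b => b < a) := by
    have h1 := PySem.List.sorted_pairwise_rev (PySem.Dict.counter EV).keys (fun x : Int => x)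
    have := List.Pairwise.and h1 hndK
    exact this.imp (fun h => lt_of_le_of_ne h.1 (Ne.symm h.2))
  have hperm : ((PySem.List.sorted (PySem.Dict.counter EV).keys (fun x => x) true).flatMap
      (fun v => List.replicate (EV.count v) v)).Perm EV := by
    rw [List.perm_iff_count]
    intro a
    rw [count_flatMap (fun v => EV.count v) _ a hndK]
    split_ifs with hmem
    · rfl
    · exact (List.count_eq_zero.mpr (fun hc => hmem ((hmemK a).mpr hc))).symm
  have hpairL : ((PySem.List.sorted (PySem.Dict.counter EV).keys (fun x => x) true).flatMap
      (fun v => List.replicate (EV.count v) v)).Pairwise (fun a b => b ≤ a) :=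
    pairwise_flatMap (fun v => EV.count v) _ hpairK
  have hpairS : ((PySem.List.sorted EV (fun x => x) false).reverse).Pairwise (fun a b : Int => b ≤ a) := by
    rw [List.pairwise_reverse]
    exact PySem.List.sorted_pairwise EV (fun x : Int => x)
  have hpermS : ((PySem.List.sorted EV (fun x => x) false).reverse).Perm
      ((PySem.List.sorted (PySem.Dict.counter EV).keys (fun x => x) true).flatMap
        (fun v => List.replicate (EV.count v) v)) :=
    ((PySem.List.sorted EV (fun x => x) false).reverse_perm.trans
      (PySem.List.sorted_perm EV (fun x => x) false)).trans hperm.symm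
  exact List.Perm.eq_of_pairwise (fun a b _ _ h1 h2 => le_antisymm h2 h1) hpairS hpairL hpermS

lemma gl_repl (n v : Int) (hv : 1 ≤ v) : ∀ (len : Nat) (c u : Int) (rest : List Int),
    c + len * v < n →
    gloop n c u (List.replicate len v ++ rest) = gloop n (c + len * v) (u + len) rest := by
  intro len
  induction len with
  | zero => intro c u rest _; simp
  | succ len ih =>
    intro c u rest h
    have hcast : ((len + 1 : Nat) : Int) * v = (len : Int) * v + v := by push_cast; ring
    have hnn : 0 ≤ (len : Int) * v := mul_nonneg (by positivity) (by omega)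
    simp only [List.replicate_succ, List.cons_append, gloop]
    rw [if_neg (by omega)]
    rw [ih (c + v) (u + 1) rest (by omega)]
    congr 1 <;> push_cast <;> ring

lemma gl_cross (n v : Int) (hv : 1 ≤ v) : ∀ (k : Nat) (c u : Int) (len : Nat) (rest : List Int),
    1 ≤ k → k ≤ len → n ≤ c + k * v → c + ((k : Int) - 1) * v < n →
    gloop n c u (List.replicate len v ++ rest) = u + k - 1 := by
  intro k
  induction k with
  | zero => intro c u len rest h1; omega
  | succ k ih =>
    intro c u len rest h1 h2 h3 h4
    cases len with
    | zero => omega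
    | succ len' =>
      simp only [List.replicate_succ, List.cons_append, gloop]
      by_cases hk : k = 0
      · subst hk
        rw [if_pos (by push_cast at h3 ⊢; omega)]
        push_cast
        ring
      · have hk1 : (1 : Int) ≤ (k : Int) := by exact_mod_cast Nat.one_le_iff_ne_zero.mpr hk
        have hvk : v ≤ (k : Int) * v := by nlinarith
        have hc4 : c + (k : Int) * v < n := by push_cast at h4; linarith [h4]
        rw [if_neg (by omega)]
        rw [ih (c + v) (u + 1) len' rest (by omega) (by omega) (by push_cast at h3 ⊢; linarith) (by linarith)]
        push_cast
        ring

lemma bg (n : Int) (EV : List Int) : ∀ (Ks : List Int) (count used : Int), count < n →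
    (∀ v ∈ Ks, 1 ≤ v) → (∀ v ∈ Ks, v ∈ EV) →
    bloop n (PySem.Dict.counter EV) count used Ks
    = gloop n count (used + 1) (Ks.flatMap (fun v => List.replicate (EV.count v) v)) := by
  intro Ks
  induction Ks with
  | nil => intro count used _ _ _; simp [bloop, gloop]
  | cons v rest ih =>
    intro count used hcn h1 h2
    have hv : 1 ≤ v := h1 v (by simp)
    have hvEV : v ∈ EV := h2 v (by simp)
    have hcnt : 0 < EV.count v := List.count_pos_iff.mpr hvEV
    simp only [bloop, List.flatMap_cons]
    rw [PySem.Dict.getD_counter]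
    have hiff := (PySem.Int.neg_floordiv_neg_eq_iff_of_pos (a := n - count) (b := v)
      (q := -(PySem.Int.floordiv (-(n - count)) v)) (by omega)).mp rfl
    have hneed1 : (1 : Int) ≤ n - count := by omega
    set t0 := -(PySem.Int.floordiv (-(n - count)) v) with ht0
    have ht0pos : 1 ≤ t0 := by nlinarith [hiff.2]
    by_cases hbr : t0 > (EV.count v : Int)
    · rw [if_pos hbr]
      have hle : ((EV.count v : Int)) * v ≤ (t0 - 1) * v :=
        mul_le_mul_of_nonneg_right (by omega) (by omega)
      have hlt : count + (EV.count v : Int) * v < n := by linarith [hiff.1]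
      rw [if_neg (by omega)]
      rw [ih _ _ hlt (fun x hx => h1 x (by simp [hx])) (fun x hx => h2 x (by simp [hx]))]
      rw [gl_repl n v hv (EV.count v) count (used + 1) _ hlt]
      congr 1
      ring
    · rw [if_neg hbr]
      have hge : n ≤ count + t0 * v := by linarith [hiff.2]
      rw [if_pos (by omega)]
      have ht0n : ((t0.toNat : Nat) : Int) = t0 := Int.toNat_of_nonneg (by omega)
      rw [gl_cross n v hv t0.toNat count (used + 1) (EV.count v) _ (by omega) (by omega)
        (by rw [ht0n]; linarith) (by rw [ht0n]; linarith [hiff.1])]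
      rw [ht0n]
      ring

lemma memEVA (m : Int) (v : Int)
    (hv : v ∈ (PySem.List.pyRange 2 (m + 1) 2).map counterA) : 1 ≤ v := by
  obtain ⟨j, hj, rfl⟩ := List.mem_map.mp hv
  obtain ⟨hj1, hj2, hj3⟩ := (PySem.List.mem_pyRange_iff_of_pos (by norm_num) j).mp hj
  have hjd : (2 : Int) ∣ j := by omega
  exact counterA_pos j ((PySem.Int.mod_eq_zero_iff_dvd j 2).mpr hjd) (by omega)

-- ===== VERDICT (by name: the statement is the Claim_ definition above) =====
theorem solution_spec : Claim_equal_solution := by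
  unfold Claim_equal_solution
  intro nums n hdom hpre
  unfold Spec_solution
  simp only [solution, solution_alt]
  rw [foldA nums 0 0 []]
  dsimp only
  simp only [List.nil_append, ctzB_eq_counterA]
  have hodd : ¬ (PySem.Int.mod ((0 : Int) + 1) 2 = 0) := by decide
  rw [G_eq nums.length 0, if_neg hodd]
  rw [show (0 : Int) + 2 = 2 from by norm_num]
  rw [show (0 : Int) + 1 + (nums.length : Int) = (nums.length : Int) + 1 from by ring]
  have hbuck : (PySem.List.pyRange 2 ((nums.length : Int) + 1) 2).foldl
      (fun d j => d.insert (counterA j) (d.getD (counterA j) 0 + 1)) (PySem.Dict.empty : PySem.Dict Int Int)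
      = PySem.Dict.counter ((PySem.List.pyRange 2 ((nums.length : Int) + 1) 2).map counterA) := by
    rw [← PySem.Dict.foldl_insert_getD_add_one_eq_counter, List.foldl_map]
  rw [hbuck]
  by_cases hge : nums.foldl (fun a x => a + counterA x) 0 ≥ n
  · rw [if_pos hge, if_pos hge]
  · rw [if_neg hge, if_neg hge]
    have hK : ∀ v ∈ PySem.List.sorted
        (PySem.Dict.counter ((PySem.List.pyRange 2 ((nums.length : Int) + 1) 2).map counterA)).keys
        (fun x => x) true,
        v ∈ (PySem.List.pyRange 2 ((nums.length : Int) + 1) 2).map counterA := by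
      intro v hv
      rw [PySem.List.mem_sorted, PySem.Dict.keys_counter, PySem.Set.mem_ofList] at hv
      exact hv
    have h1 : whileA n (nums.foldl (fun a x => a + counterA x) 0) 1
        (PySem.List.sorted ((PySem.List.pyRange 2 ((nums.length : Int) + 1) 2).map counterA) (fun x => x) false)
        = gloop n (nums.foldl (fun a x => a + counterA x) 0) 1
          ((PySem.List.sorted ((PySem.List.pyRange 2 ((nums.length : Int) + 1) 2).map counterA) (fun x => x) false).reverse) := by
      conv_lhs => rw [← List.reverse_reverse
        (PySem.List.sorted ((PySem.List.pyRange 2 ((nums.length : Int) + 1) 2).map counterA) (fun x => x) false)]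
      exact whileA_eq_gloop n _ _ 1
    rw [h1, sorted_rev_eq_flatMap]
    rw [bg n _ _ _ 0 (by omega) (fun v hv => memEVA _ v (hK v hv)) hK]
    norm_num
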